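-- pv_equiv track=rewrite | github.com/reneaas/munchboka-edutools | src/munchboka_edutools/directives/_triangle.py | _parse_label_modes
-- ===== SOURCE A (Python) =====
-- from typing import Any, Callable, Dict, List, Tuple
--
-- def _split_top_level_commas(text: str) -> List[str]:
--     if not text.strip():
--         return []
--     out: List[str] = []
--     cur: List[str] = []
--     depth = 0
--     for ch in text:
--         if ch in "([{":
--             depth += 1
--             cur.append(ch)
--         elif ch in ")]}":
--             depth = max(0, depth - 1)
--             cur.append(ch)
--         elif ch == "," and depth == 0:
--             token = "".join(cur).strip()
--             if token:
--                 out.append(token)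
--             cur = []
--         else:
--             cur.append(ch)
--     tail = "".join(cur).strip()
--     if tail:
--         out.append(tail)
--     return out
--
-- def _strip_container(text: str) -> str:
--     s = text.strip()
--     if len(s) >= 2 and ((s[0] == "(" and s[-1] == ")") or (s[0] == "[" and s[-1] == "]")):
--         return s[1:-1].strip()
--     return s
--
-- def _parse_label_modes(
--     value: str | None,
--     allowed_keys: Tuple[str, ...],
--     default_mode: str = "none",
-- ) -> Dict[str, str]:
--     allowed_modes = {"none", "exact", "numeric"}
--     if value is None:
--         return {key: default_mode for key in allowed_keys}
--
--     raw = value.strip()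
--     if not raw:
--         return {key: default_mode for key in allowed_keys}
--
--     low = raw.lower()
--     if low in allowed_modes:
--         return {key: low for key in allowed_keys}
--
--     inner = _strip_container(raw)
--     modes = {key: "none" for key in allowed_keys}
--     for token in _split_top_level_commas(inner):
--         sep_index = token.find("=")
--         if sep_index == -1:
--             sep_index = token.find(":")
--         if sep_index == -1:
--             continue
--         key = token[:sep_index].strip().upper()
--         mode = token[sep_index + 1 :].strip().lower()
--         if key in modes and mode in allowed_modes:
--             modes[key] = mode
--     return modes
-- ===== SOURCE B (Python) =====
-- from typing import Dict, Tuple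
--
--
-- def _parse_label_modes(
--     value: str | None,
--     allowed_keys: Tuple[str, ...],
--     default_mode: str = "none",
-- ) -> Dict[str, str]:
--     allowed_modes = {"none", "exact", "numeric"}
--     if value is None:
--         return {key: default_mode for key in allowed_keys}
--
--     raw = value.strip()
--     if not raw:
--         return {key: default_mode for key in allowed_keys}
--
--     low = raw.lower()
--     if low in allowed_modes:
--         return {key: low for key in allowed_keys}
--
--     # strip one outer ()/[] wrapper (raw is nonempty and already stripped)
--     inner = raw[1:-1].strip() if raw[0] + raw[-1] in ("()", "[]") else raw
--
--     # stage 1: positions of the top-level commas (depth clamped at 0)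
--     cuts = [-1]
--     depth = 0
--     for i, ch in enumerate(inner):
--         if ch in "([{":
--             depth += 1
--         elif ch in ")]}":
--             depth = max(0, depth - 1)
--         elif ch == "," and depth == 0:
--             cuts.append(i)
--     cuts.append(len(inner))
--
--     # stage 2: slice between consecutive cuts, collect assignments (last wins)
--     assign: Dict[str, str] = {}
--     for a, b in zip(cuts, cuts[1:]):
--         token = inner[a + 1 : b].strip()
--         key, sep, mode = token.partition("=")
--         if not sep:
--             key, sep, mode = token.partition(":")
--         if not sep:
--             continue
--         mode = mode.strip().lower()
--         if mode in allowed_modes: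
--             assign[key.strip().upper()] = mode
--
--     # stage 3: one lookup per allowed key
--     return {key: assign.get(key, "none") for key in allowed_keys}
-- ===== Notes on version B (the rewrite author's own statement) =====
-- stated objective: alternative
-- what changed: B replaces A's buffer-accumulating top-level split and guarded in-place dict update by a staged index-based algorithm: one pass records the integer positions of top-level commas, tokens are then obtained by slicing between consecutive cut positions, each token is parsed with str.partition into a separate last-wins assignment dict keyed by any upper-cased key, and the result is built by a final comprehension doing one .get lookup per allowed key (no char buffer, no membership-guarded mutation of the result dict).
import Mathlib
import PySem

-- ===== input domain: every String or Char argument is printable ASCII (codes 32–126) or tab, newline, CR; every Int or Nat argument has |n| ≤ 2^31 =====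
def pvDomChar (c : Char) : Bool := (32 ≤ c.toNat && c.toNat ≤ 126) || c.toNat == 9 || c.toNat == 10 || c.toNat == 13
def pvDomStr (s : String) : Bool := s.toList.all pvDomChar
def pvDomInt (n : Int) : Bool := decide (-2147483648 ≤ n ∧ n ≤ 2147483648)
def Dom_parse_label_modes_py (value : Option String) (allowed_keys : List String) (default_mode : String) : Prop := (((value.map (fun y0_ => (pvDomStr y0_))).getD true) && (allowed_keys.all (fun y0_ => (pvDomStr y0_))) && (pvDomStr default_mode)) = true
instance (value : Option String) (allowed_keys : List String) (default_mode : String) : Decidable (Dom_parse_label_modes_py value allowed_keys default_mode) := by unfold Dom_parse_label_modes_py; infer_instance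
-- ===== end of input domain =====

-- B replaces A's buffer-accumulating split + guarded in-place update by a staged index
-- algorithm: record top-level comma positions, slice tokens between cuts, parse them with
-- partition into a last-wins assignment dict, then one lookup per allowed key; same value.

-- ===== PORT A =====
-- {key: m for key in allowed_keys}
def pvAmodes (keys : List String) (m : String) : PySem.Dict String String :=
  keys.foldl (fun d k => d.insert k m) PySem.Dict.empty

-- the 'for ch in text' loop of _split_top_level_commas (strings as char lists; out, cur, depth)
def pvAsplitLoop : List Char → List (List Char) → List Char → Int → List (List Char)
  | [], out, cur, _ =>
      -- tail = "".join(cur).strip(); if tail: out.append(tail)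
      let tail := PySem.Chars.strip cur
      if tail = [] then out else out ++ [tail]
  | c :: cs, out, cur, depth =>
      if ['(', '[', '{'].contains c then pvAsplitLoop cs out (cur ++ [c]) (depth + 1)
      else if [')', ']', '}'].contains c then pvAsplitLoop cs out (cur ++ [c]) (max 0 (depth - 1))
      else if c = ',' ∧ depth = 0 then
        let token := PySem.Chars.strip cur
        pvAsplitLoop cs (if token = [] then out else out ++ [token]) [] depth
      else pvAsplitLoop cs out (cur ++ [c]) depth

-- _split_top_level_commas
def pvAsplit (text : List Char) : List (List Char) :=
  if PySem.Chars.strip text = [] then [] else pvAsplitLoop text [] [] 0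

-- _strip_container
def pvAstripContainer (text : List Char) : List Char :=
  let s := PySem.Chars.strip text
  if 2 ≤ s.length ∧ ((PySem.List.pyGet? s 0 = some '(' ∧ PySem.List.pyGet? s (-1) = some ')') ∨
                     (PySem.List.pyGet? s 0 = some '[' ∧ PySem.List.pyGet? s (-1) = some ']')) then
    PySem.Chars.strip (PySem.List.slice s (some 1) (some (-1)))
  else s

-- the body of A's 'for token in _split_top_level_commas(inner)' loop
def pvAprocess (modes : PySem.Dict String String) (token : List Char) : PySem.Dict String String :=
  let sep0 := PySem.Chars.find token ['=']
  let sep := if sep0 = -1 then PySem.Chars.find token [':'] else sep0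
  if sep = -1 then modes
  else
    let key := String.ofList (PySem.Chars.upper (PySem.Chars.strip (PySem.List.slice token none (some sep))))
    let mode := String.ofList (PySem.Chars.lower (PySem.Chars.strip (PySem.List.slice token (some (sep + 1)) none)))
    if modes.contains key && ["none", "exact", "numeric"].contains mode then modes.insert key mode
    else modes

def parse_label_modes_py (value : Option String) (allowed_keys : List String) (default_mode : String) : List (String × String) :=
  match value with
  | none => (pvAmodes allowed_keys default_mode).items
  | some v =>
    let raw := PySem.Chars.strip v.toList
    if raw = [] then (pvAmodes allowed_keys default_mode).items
    else
      let low := PySem.Chars.lower raw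
      if ["none".toList, "exact".toList, "numeric".toList].contains low then
        (pvAmodes allowed_keys (String.ofList low)).items
      else
        let inner := pvAstripContainer raw
        ((pvAsplit inner).foldl pvAprocess (pvAmodes allowed_keys "none")).items

-- ===== PORT B =====
-- {key: m for key in allowed_keys}
def pvBmodes (keys : List String) (m : String) : PySem.Dict String String :=
  keys.foldl (fun d k => d.insert k m) PySem.Dict.empty

-- stage 1: 'for i, ch in enumerate(inner)' collecting top-level comma positions (index threaded)
def pvBcutsLoop : List Char → Int → List Int → Int → List Int
  | [], _, cuts, _ => cuts
  | c :: cs, i, cuts, depth =>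
      if ['(', '[', '{'].contains c then pvBcutsLoop cs (i + 1) cuts (depth + 1)
      else if [')', ']', '}'].contains c then pvBcutsLoop cs (i + 1) cuts (max 0 (depth - 1))
      else if c = ',' ∧ depth = 0 then pvBcutsLoop cs (i + 1) (cuts ++ [i]) depth
      else pvBcutsLoop cs (i + 1) cuts depth

-- str.partition(sep) for a one-char sep: (before, found?, after); exact (first occurrence, whole
-- string in `before` and flag false when absent)
def pvPartition (t : List Char) (c : Char) : List Char × Bool × List Char :=
  let i := PySem.Chars.find t [c]
  if i = -1 then (t, false, [])
  else (PySem.List.slice t none (some i), true, PySem.List.slice t (some (i + 1)) none)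

-- stage 2 loop body: strip the slice, partition on '=' then ':', record a valid assignment (last wins)
def pvBassignStep (assign : PySem.Dict String String) (chunk : List Char) : PySem.Dict String String :=
  let token := PySem.Chars.strip chunk
  let r1 := pvPartition token '='
  let r := if r1.2.1 then r1 else pvPartition token ':'
  if r.2.1 then
    let mode := String.ofList (PySem.Chars.lower (PySem.Chars.strip r.2.2))
    if ["none", "exact", "numeric"].contains mode then
      assign.insert (String.ofList (PySem.Chars.upper (PySem.Chars.strip r.1))) mode
    else assign
  else assign

def parse_label_modes_py_alt (value : Option String) (allowed_keys : List String) (default_mode : String) : List (String × String) :=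
  match value with
  | none => (pvBmodes allowed_keys default_mode).items
  | some v =>
    let raw := PySem.Chars.strip v.toList
    if raw = [] then (pvBmodes allowed_keys default_mode).items
    else
      let low := PySem.Chars.lower raw
      if ["none".toList, "exact".toList, "numeric".toList].contains low then
        (pvBmodes allowed_keys (String.ofList low)).items
      else
        -- raw[0] + raw[-1] in ("()", "[]"); raw is nonempty here so both pyGet? are `some`
        let inner :=
          if (PySem.List.pyGet? raw 0 = some '(' ∧ PySem.List.pyGet? raw (-1) = some ')') ∨
             (PySem.List.pyGet? raw 0 = some '[' ∧ PySem.List.pyGet? raw (-1) = some ']') then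
            PySem.Chars.strip (PySem.List.slice raw (some 1) (some (-1)))
          else raw
        let cuts := pvBcutsLoop inner 0 [-1] 0 ++ [(inner.length : Int)]
        let assign := (cuts.zip cuts.tail).foldl
          (fun a p => pvBassignStep a (PySem.List.slice inner (some (p.1 + 1)) (some p.2)))
          PySem.Dict.empty
        (allowed_keys.foldl (fun d k => d.insert k (assign.getD k "none")) PySem.Dict.empty).items

-- ===== PRECONDITION & SPEC =====
def Spec_parse_label_modes_py (value : Option String) (allowed_keys : List String) (default_mode : String) (out : List (String × String)) : Prop := out = parse_label_modes_py_alt value allowed_keys default_mode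
instance (value : Option String) (allowed_keys : List String) (default_mode : String) (out : List (String × String)) : Decidable (Spec_parse_label_modes_py value allowed_keys default_mode out) := by unfold Spec_parse_label_modes_py; infer_instance

-- ===== CLAIM (what is proved, stated in full; the proofs are below) =====
def Claim_equal_parse_label_modes_py : Prop := ∀ (value : Option String) (allowed_keys : List String) (default_mode : String), Dom_parse_label_modes_py value allowed_keys default_mode → Spec_parse_label_modes_py value allowed_keys default_mode (parse_label_modes_py value allowed_keys default_mode)

-- ===== LEMMAS AND PROOFS =====

-- ---------- generic string-strip facts ----------
theorem pv_dropWhile_idem {p : Char → Bool} (l : List Char) :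
    List.dropWhile p (List.dropWhile p l) = List.dropWhile p l := by
  induction l with
  | nil => simp
  | cons a t ih =>
    by_cases h : p a
    · simpa [h] using ih
    · simp [h]

theorem pv_dropWhile_take {p : Char → Bool} (y : List Char) (k : Nat)
    (h : List.dropWhile p y = y) : List.dropWhile p (y.take k) = y.take k := by
  cases y with
  | nil => simp
  | cons a t =>
    have ha : p a = false := by
      by_contra hpa
      simp only [Bool.not_eq_false] at hpa
      have hlen := (List.dropWhile_suffix (l := t) p).length_le
      rw [List.dropWhile_cons, if_pos hpa] at h
      have := congrArg List.length h
      simp at this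
      omega
    cases k with
    | zero => simp
    | succ k => simp [ha]

theorem pv_rstrip_prefix (y : List Char) : PySem.Chars.rstrip y <+: y := by
  have hsuf : List.dropWhile PySem.Chars.isspace y.reverse <:+ y.reverse :=
    List.dropWhile_suffix _
  have := (List.reverse_suffix (l₁ := (List.dropWhile PySem.Chars.isspace y.reverse).reverse)
    (l₂ := y)).mp (by simpa using hsuf)
  simpa [PySem.Chars.rstrip] using this

theorem pv_lstrip_rstrip (y : List Char)
    (h : PySem.Chars.lstrip y = y) : PySem.Chars.lstrip (PySem.Chars.rstrip y) = PySem.Chars.rstrip y := by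
  obtain hpre := pv_rstrip_prefix y
  rw [List.prefix_iff_eq_take] at hpre
  rw [hpre]
  exact pv_dropWhile_take y _ h

theorem pv_strip_idem (l : List Char) :
    PySem.Chars.strip (PySem.Chars.strip l) = PySem.Chars.strip l := by
  show PySem.Chars.rstrip (PySem.Chars.lstrip (PySem.Chars.rstrip (PySem.Chars.lstrip l)))
      = PySem.Chars.rstrip (PySem.Chars.lstrip l)
  rw [pv_lstrip_rstrip (PySem.Chars.lstrip l) (pv_dropWhile_idem l)]
  show (List.dropWhile PySem.Chars.isspace
      ((List.dropWhile PySem.Chars.isspace (PySem.Chars.lstrip l).reverse).reverse).reverse).reverse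
      = PySem.Chars.rstrip (PySem.Chars.lstrip l)
  rw [List.reverse_reverse, pv_dropWhile_idem]
  rfl

-- ---------- the common segment structure: chunks between top-level commas ----------
def pvMapHead (f : List Char → List Char) : List (List Char) → List (List Char)
  | [] => []
  | h :: t => f h :: t

def pvChunks : List Char → Int → List (List Char)
  | [], _ => [[]]
  | c :: cs, depth =>
      if ['(', '[', '{'].contains c then pvMapHead (c :: ·) (pvChunks cs (depth + 1))
      else if [')', ']', '}'].contains c then pvMapHead (c :: ·) (pvChunks cs (max 0 (depth - 1)))
      else if c = ',' ∧ depth = 0 then [] :: pvChunks cs depth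
      else pvMapHead (c :: ·) (pvChunks cs depth)

theorem pvMapHead_mapHead (f g : List Char → List Char) (l : List (List Char)) :
    pvMapHead f (pvMapHead g l) = pvMapHead (fun x => f (g x)) l := by
  cases l <;> rfl

theorem pvMapHead_congr (f g : List Char → List Char) (h : ∀ x, f x = g x)
    (l : List (List Char)) : pvMapHead f l = pvMapHead g l := by
  cases l <;> simp [pvMapHead, h]

theorem pvMapHead_nil_append (l : List (List Char)) :
    pvMapHead (fun t => [] ++ t) l = l := by
  cases l <;> rfl

-- ---------- A side: the split loop produces the stripped nonempty chunks ----------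
theorem pv_splitLoop_out (cs : List Char) (out : List (List Char)) (cur : List Char) (depth : Int) :
    pvAsplitLoop cs out cur depth = out ++ pvAsplitLoop cs [] cur depth := by
  induction cs generalizing out cur depth with
  | nil =>
    simp only [pvAsplitLoop]
    split <;> simp
  | cons c cs ih =>
    simp only [pvAsplitLoop]
    by_cases h1 : (['(', '[', '{'].contains c) = true
    · simp only [h1, if_true]
      exact ih _ _ _
    · by_cases h2 : ([')', ']', '}'].contains c) = true
      · simp only [h1, h2, if_true, if_false, Bool.false_eq_true]
        exact ih _ _ _
      · by_cases h3 : c = ',' ∧ depth = 0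
        · simp only [h1, h2, Bool.false_eq_true, if_false, if_pos h3]
          by_cases ht : PySem.Chars.strip cur = []
          · rw [if_pos ht, if_pos ht, ih]
          · rw [if_neg ht, if_neg ht, ih (out := out ++ [PySem.Chars.strip cur]),
              ih (out := [] ++ [PySem.Chars.strip cur])]
            simp only [List.nil_append, List.append_assoc]
        · simp only [h1, h2, Bool.false_eq_true, if_false, if_neg h3]
          exact ih _ _ _

theorem pv_splitLoop_chunks (cs : List Char) (cur : List Char) (depth : Int) :
    pvAsplitLoop cs [] cur depth =
      ((pvMapHead (cur ++ ·) (pvChunks cs depth)).map PySem.Chars.strip).filter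
        (fun t => decide (t ≠ [])) := by
  induction cs generalizing cur depth with
  | nil =>
    simp only [pvAsplitLoop, pvChunks, pvMapHead, List.append_nil, List.map, List.filter]
    by_cases h : PySem.Chars.strip cur = [] <;> simp [h]
  | cons c cs ih =>
    simp only [pvAsplitLoop, pvChunks]
    by_cases h1 : (['(', '[', '{'].contains c) = true
    · simp only [h1, if_true]
      rw [ih, pvMapHead_mapHead]
      exact congrArg _ (congrArg _ (pvMapHead_congr _ _ (fun x => by simp) _))
    · by_cases h2 : ([')', ']', '}'].contains c) = true
      · simp only [h1, h2, if_true, if_false, Bool.false_eq_true]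
        rw [ih, pvMapHead_mapHead]
        exact congrArg _ (congrArg _ (pvMapHead_congr _ _ (fun x => by simp) _))
      · by_cases h3 : c = ',' ∧ depth = 0
        · simp only [h1, h2, Bool.false_eq_true, if_false, if_pos h3]
          rw [pv_splitLoop_out, ih, pvMapHead_nil_append]
          simp only [pvMapHead, List.append_nil, List.map, List.filter]
          by_cases ht : PySem.Chars.strip cur = [] <;> simp [ht]
        · simp only [h1, h2, Bool.false_eq_true, if_false, if_neg h3]
          rw [ih, pvMapHead_mapHead]
          exact congrArg _ (congrArg _ (pvMapHead_congr _ _ (fun x => by simp) _))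

theorem pv_split_chunks (inner : List Char) (h : PySem.Chars.strip inner = inner) :
    pvAsplit inner =
      ((pvChunks inner 0).map PySem.Chars.strip).filter (fun t => decide (t ≠ [])) := by
  unfold pvAsplit
  by_cases hi : inner = []
  · subst hi
    have h0 : PySem.Chars.strip ([] : List Char) = [] := rfl
    rw [if_pos h0]
    simp [pvChunks, h0]
  · rw [if_neg (by rw [h]; exact hi), pv_splitLoop_chunks, pvMapHead_nil_append]

-- ---------- B side: consecutive slices between cuts are the chunks ----------
def pvPairsSlices (inner : List Char) (l : List Int) : List (List Char) :=
  (l.zip l.tail).map (fun p => PySem.List.slice inner (some (p.1 + 1)) (some p.2))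

theorem pv_cutsLoop_out (cs : List Char) (i : Int) (cuts : List Int) (depth : Int) :
    pvBcutsLoop cs i cuts depth = cuts ++ pvBcutsLoop cs i [] depth := by
  induction cs generalizing i cuts depth with
  | nil => simp [pvBcutsLoop]
  | cons c cs ih =>
    simp only [pvBcutsLoop]
    by_cases h1 : (['(', '[', '{'].contains c) = true
    · simp only [h1, if_true]; exact ih _ _ _
    · by_cases h2 : ([')', ']', '}'].contains c) = true
      · simp only [h1, h2, if_true, if_false, Bool.false_eq_true]; exact ih _ _ _
      · by_cases h3 : c = ',' ∧ depth = 0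
        · simp only [h1, h2, Bool.false_eq_true, if_false, if_pos h3]
          rw [ih (cuts := cuts ++ [i]), ih (cuts := [] ++ [i])]
          simp only [List.nil_append, List.append_assoc]
        · simp only [h1, h2, Bool.false_eq_true, if_false, if_neg h3]; exact ih _ _ _

theorem pvPairsSlices_cons (inner : List Char) (a b : Int) (t : List Int) :
    pvPairsSlices inner (a :: b :: t)
      = PySem.List.slice inner (some (a + 1)) (some b) :: pvPairsSlices inner (b :: t) := by
  simp [pvPairsSlices]

theorem pv_pairsSlices_chunks (inner : List Char) (cs : List Char) (s j : Nat) (depth : Int)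
    (hsj : s ≤ j) (hcs : cs = inner.drop j) (hj : j ≤ inner.length) :
    pvPairsSlices inner (((s : Int) - 1) :: pvBcutsLoop cs (j : Int) [] depth ++ [(inner.length : Int)])
      = pvMapHead (fun t => (inner.drop s).take (j - s) ++ t) (pvChunks cs depth) := by
  induction cs generalizing s j depth with
  | nil =>
    have hlen : j = inner.length := by
      have := congrArg List.length hcs
      simp [List.length_drop] at this
      omega
    subst hlen
    have e1 : ((s : Int) - 1 + 1) = (s : Int) := by omega
    have hps : pvPairsSlices inner [((s : Int) - 1), (inner.length : Int)]
        = [PySem.List.slice inner (some ((s : Int) - 1 + 1)) (some (inner.length : Int))] := by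
      simp [pvPairsSlices]
    have htk : (inner.drop s).take (inner.length - s) = inner.drop s :=
      List.take_of_length_le (by simp)
    simp only [pvBcutsLoop, pvChunks, List.cons_append, List.nil_append]
    rw [hps, e1, PySem.List.slice_natCast, htk]
    simp [pvMapHead]

  | cons c cs' ih =>
    have hjlt : j < inner.length := by
      have := congrArg List.length hcs
      simp [List.length_drop] at this
      omega
    have hc : inner[j]? = some c := by
      have h0 : (inner.drop j)[0]? = some c := by rw [← hcs]; rfl
      rwa [List.getElem?_drop, Nat.add_zero] at h0
    have hcs' : cs' = inner.drop (j + 1) := by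
      rw [← List.tail_drop, ← hcs]
      rfl
    have hcast : ((j : Int) + 1) = (((j + 1 : Nat)) : Int) := by push_cast; ring
    have htake : ∀ s' : Nat, s' ≤ j →
        (inner.drop s').take (j + 1 - s') = (inner.drop s').take (j - s') ++ [c] := by
      intro s' hs'
      have e : j + 1 - s' = (j - s') + 1 := by omega
      rw [e, List.take_add_one, List.getElem?_drop]
      have : s' + (j - s') = j := by omega
      rw [this, hc]
      rfl
    simp only [pvBcutsLoop, pvChunks]
    by_cases h1 : (['(', '[', '{'].contains c) = true
    · simp only [h1, if_true]
      rw [hcast, ih s (j + 1) (depth + 1) (by omega) hcs' (by omega), pvMapHead_mapHead]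
      exact pvMapHead_congr _ _ (fun x => by rw [htake s hsj]; simp) _
    · by_cases h2 : ([')', ']', '}'].contains c) = true
      · simp only [h1, h2, if_true, if_false, Bool.false_eq_true]
        rw [hcast, ih s (j + 1) (max 0 (depth - 1)) (by omega) hcs' (by omega), pvMapHead_mapHead]
        exact pvMapHead_congr _ _ (fun x => by rw [htake s hsj]; simp) _
      · by_cases h3 : c = ',' ∧ depth = 0
        · simp only [h1, h2, Bool.false_eq_true, if_false, if_pos h3]
          rw [pv_cutsLoop_out]
          have e1 : ((s : Int) - 1 + 1) = (s : Int) := by omega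
          simp only [List.cons_append, List.nil_append]
          rw [pvPairsSlices_cons, e1, PySem.List.slice_natCast]
          have e2 : ((j : Int)) = (((j + 1 : Nat)) : Int) - 1 := by push_cast; ring
          rw [hcast, e2, ← List.cons_append, ih (j + 1) (j + 1) depth (le_refl _) hcs' (by omega)]
          simp only [Nat.sub_self, List.take_zero, pvMapHead_nil_append]
          cases pvChunks cs' depth <;> simp [pvMapHead]
        · simp only [h1, h2, Bool.false_eq_true, if_false, if_neg h3]
          rw [hcast, ih s (j + 1) depth (by omega) hcs' (by omega), pvMapHead_mapHead]
          exact pvMapHead_congr _ _ (fun x => by rw [htake s hsj]; simp) _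

theorem pv_slices_eq_chunks (inner : List Char) :
    pvPairsSlices inner (pvBcutsLoop inner 0 [-1] 0 ++ [(inner.length : Int)])
      = pvChunks inner 0 := by
  rw [pv_cutsLoop_out]
  have h := pv_pairsSlices_chunks inner inner 0 0 0 (le_refl _) (by simp) (by omega)
  simp only [Nat.cast_zero, zero_sub, Nat.sub_self, List.drop_zero, List.take_zero,
    pvMapHead_nil_append] at h
  simpa only [List.cons_append, List.nil_append] using h

-- ---------- parsing one token: the partition form and the find form agree ----------
def pvStep' (assign : PySem.Dict String String) (token : List Char) : PySem.Dict String String :=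
  let r1 := pvPartition token '='
  let r := if r1.2.1 then r1 else pvPartition token ':'
  if r.2.1 then
    let mode := String.ofList (PySem.Chars.lower (PySem.Chars.strip r.2.2))
    if ["none", "exact", "numeric"].contains mode then
      assign.insert (String.ofList (PySem.Chars.upper (PySem.Chars.strip r.1))) mode
    else assign
  else assign

theorem pvStep'_nil (a : PySem.Dict String String) : pvStep' a [] = a := rfl

-- ---------- the deferred-assignment dict vs the guarded in-place update ----------
def pvFinal (keys : List String) (a : PySem.Dict String String) : PySem.Dict String String :=
  keys.foldl (fun d k => d.insert k (a.getD k "none")) PySem.Dict.empty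

theorem pvFinal_getD (keys : List String) (a d : PySem.Dict String String) (k : String) (d0 : String) :
    (keys.foldl (fun d k => d.insert k (a.getD k "none")) d).getD k d0
      = if k ∈ keys then a.getD k "none" else d.getD k d0 := by
  induction keys generalizing d with
  | nil => simp
  | cons k' ks ih =>
    simp only [List.foldl_cons, ih, PySem.Dict.getD_insert, List.mem_cons]
    by_cases hks : k ∈ ks
    · simp [hks]
    · by_cases hk : k = k' <;> simp [hk, hks]

theorem pvFinal_keys (keys : List String) (a : PySem.Dict String String) :
    (pvFinal keys a).keys = PySem.Set.ofList keys := by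
  unfold pvFinal
  rw [PySem.Dict.keys_foldl_insert (f := fun _ x => a.getD x "none")]
  simp [PySem.Dict.keys_empty, PySem.Set.update_nil_left]

theorem pv_final_ext (keys : List String) (a b : PySem.Dict String String)
    (hab : ∀ k ∈ keys, a.getD k "none" = b.getD k "none") :
    pvFinal keys a = pvFinal keys b := by
  unfold pvFinal
  exact PySem.List.foldl_congr_mem _ _ _ _ (fun d k hk => by rw [hab k hk])

theorem pv_final_insert_not_mem (keys : List String) (a : PySem.Dict String String)
    (key : String) (mode : String) (h : key ∉ keys) :
    pvFinal keys a = pvFinal keys (a.insert key mode) := by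
  refine pv_final_ext _ _ _ (fun k hk => ?_)
  rw [PySem.Dict.getD_insert, if_neg (show ¬ k = key from fun heq => h (heq ▸ hk))]

theorem pv_insert_final (keys : List String) (a : PySem.Dict String String)
    (key : String) (mode : String) (h : key ∈ keys) :
    (pvFinal keys a).insert key mode = pvFinal keys (a.insert key mode) := by
  have hcont : (pvFinal keys a).contains key = true := by
    rw [PySem.Dict.contains_iff_mem_keys, pvFinal_keys, PySem.Set.mem_ofList]
    exact h
  have hk1 : ((pvFinal keys a).insert key mode).keys = PySem.Set.ofList keys := by
    rw [PySem.Dict.keys_insert_of_contains _ _ hcont, pvFinal_keys]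
  have hk2 : (pvFinal keys (a.insert key mode)).keys = PySem.Set.ofList keys := pvFinal_keys _ _
  apply PySem.Dict.ext
  rw [PySem.Dict.items_eq_map_keys _ (by rw [hk1]; exact PySem.Set.nodup_ofList keys) "none",
    PySem.Dict.items_eq_map_keys _ (by rw [hk2]; exact PySem.Set.nodup_ofList keys) "none",
    hk1, hk2]
  refine List.map_congr_left (fun k hk => ?_)
  have hkk : k ∈ keys := (PySem.Set.mem_ofList keys k).mp hk
  have hL : ((pvFinal keys a).insert key mode).getD k "none"
      = if k = key then mode else a.getD k "none" := by
    rw [PySem.Dict.getD_insert]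
    by_cases he : k = key
    · simp [he]
    · rw [if_neg he, if_neg he]
      unfold pvFinal
      rw [pvFinal_getD, if_pos hkk]
  have hR : (pvFinal keys (a.insert key mode)).getD k "none"
      = if k = key then mode else a.getD k "none" := by
    unfold pvFinal
    rw [pvFinal_getD, if_pos hkk, PySem.Dict.getD_insert]
  rw [hL, hR]

theorem pv_guard (keys : List String) (a : PySem.Dict String String) (key mode : String)
    (cond : Bool) :
    (if ((pvFinal keys a).contains key && cond) = true then (pvFinal keys a).insert key mode
     else pvFinal keys a)
      = pvFinal keys (if cond = true then a.insert key mode else a) := by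
  cases cond
  · simp
  · simp only [Bool.and_true, if_true]
    by_cases hk : key ∈ keys
    · have hcont : (pvFinal keys a).contains key = true := by
        rw [PySem.Dict.contains_iff_mem_keys, pvFinal_keys, PySem.Set.mem_ofList]
        exact hk
      rw [if_pos hcont, pv_insert_final _ _ _ _ hk]
    · have hcont : (pvFinal keys a).contains key = false := by
        rw [Bool.eq_false_iff]
        intro hco
        rw [PySem.Dict.contains_iff_mem_keys, pvFinal_keys, PySem.Set.mem_ofList] at hco
        exact hk hco
      rw [if_neg (by simp [hcont]), pv_final_insert_not_mem _ _ _ _ hk]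

set_option maxHeartbeats 1000000 in
theorem pv_process_step (keys : List String) (a : PySem.Dict String String) (t : List Char) :
    pvAprocess (pvFinal keys a) t = pvFinal keys (pvStep' a t) := by
  simp only [pvAprocess, pvStep', pvPartition]
  by_cases he : PySem.Chars.find t ['='] = -1
  · by_cases hc : PySem.Chars.find t [':'] = -1
    · simp [he, hc]
    · simp only [he, hc, if_true, if_false]
      exact pv_guard keys a _ _ _
  · simp only [if_neg he]
    exact pv_guard keys a _ _ _

theorem pv_fold_final (keys : List String) (ts : List (List Char)) (a : PySem.Dict String String) :
    ts.foldl pvAprocess (pvFinal keys a) = pvFinal keys (ts.foldl pvStep' a) := by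
  induction ts generalizing a with
  | nil => rfl
  | cons t ts ih => simp only [List.foldl_cons, pv_process_step, ih]

theorem pv_modes0_final (keys : List String) :
    pvAmodes keys "none" = pvFinal keys PySem.Dict.empty := by
  unfold pvAmodes pvFinal
  exact PySem.List.foldl_congr_mem _ _ _ _ (fun d k _ => by simp [PySem.Dict.getD_empty])

-- ---------- container strip ----------
theorem pv_strip_container (raw : List Char) (h : PySem.Chars.strip raw = raw) :
    pvAstripContainer raw =
      (if 2 ≤ raw.length ∧ ((PySem.List.pyGet? raw 0 = some '(' ∧ PySem.List.pyGet? raw (-1) = some ')') ∨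
                            (PySem.List.pyGet? raw 0 = some '[' ∧ PySem.List.pyGet? raw (-1) = some ']')) then
        PySem.Chars.strip (PySem.List.slice raw (some 1) (some (-1)))
      else raw) := by
  simp only [pvAstripContainer, h]

theorem pv_container_cond (raw : List Char) :
    (2 ≤ raw.length ∧ ((PySem.List.pyGet? raw 0 = some '(' ∧ PySem.List.pyGet? raw (-1) = some ')') ∨
                       (PySem.List.pyGet? raw 0 = some '[' ∧ PySem.List.pyGet? raw (-1) = some ']')))
      ↔ ((PySem.List.pyGet? raw 0 = some '(' ∧ PySem.List.pyGet? raw (-1) = some ')') ∨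
         (PySem.List.pyGet? raw 0 = some '[' ∧ PySem.List.pyGet? raw (-1) = some ']')) := by
  constructor
  · rintro ⟨_, h⟩; exact h
  · rintro h
    refine ⟨?_, h⟩
    match raw, h with
    | [], h => simp [PySem.List.pyGet?] at h
    | [c], h =>
        simp [PySem.List.pyGet?_neg_one] at h
        rcases h with ⟨h1, h2⟩ | ⟨h1, h2⟩ <;> subst h1 <;> simp at h2
    | a :: b :: t, _ => simp

theorem pv_strip_container_stripped (raw : List Char) (h : PySem.Chars.strip raw = raw) :
    PySem.Chars.strip (pvAstripContainer raw) = pvAstripContainer raw := by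
  rw [pv_strip_container raw h]
  split
  · exact pv_strip_idem _
  · exact h

-- ---------- filtering out empty tokens is free ----------
theorem pv_fold_filter (ts : List (List Char)) (a : PySem.Dict String String) :
    ts.foldl pvStep' a = (ts.filter (fun t => decide (t ≠ []))).foldl pvStep' a := by
  rw [← PySem.List.foldl_ite_eq_foldl_filter (p := fun t => t ≠ ([] : List Char))]
  refine PySem.List.foldl_congr_mem _ _ _ _ (fun acc t _ => ?_)
  by_cases ht : t = ([] : List Char)
  · subst ht; simp [pvStep'_nil]
  · simp [ht]

-- ===== VERDICT (by name: the statement is the Claim_ definition above) =====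
theorem parse_label_modes_py_spec : Claim_equal_parse_label_modes_py := by
  intro value allowed_keys default_mode _
  unfold Spec_parse_label_modes_py
  cases value with
  | none => rfl
  | some v =>
    simp only [parse_label_modes_py, parse_label_modes_py_alt]
    have hidem := pv_strip_idem v.toList
    by_cases h0 : PySem.Chars.strip v.toList = []
    · rw [if_pos h0, if_pos h0]
      rfl
    · rw [if_neg h0, if_neg h0]
      by_cases h1 : (["none".toList, "exact".toList, "numeric".toList].contains
          (PySem.Chars.lower (PySem.Chars.strip v.toList))) = true
      · simp only [h1, if_true]
        rfl
      · simp only [h1, Bool.false_eq_true, if_false]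
        have hEq : (if (PySem.List.pyGet? (PySem.Chars.strip v.toList) 0 = some '(' ∧
                        PySem.List.pyGet? (PySem.Chars.strip v.toList) (-1) = some ')') ∨
                       (PySem.List.pyGet? (PySem.Chars.strip v.toList) 0 = some '[' ∧
                        PySem.List.pyGet? (PySem.Chars.strip v.toList) (-1) = some ']') then
              PySem.Chars.strip (PySem.List.slice (PySem.Chars.strip v.toList) (some 1) (some (-1)))
            else PySem.Chars.strip v.toList)
            = pvAstripContainer (PySem.Chars.strip v.toList) := by
          rw [pv_strip_container _ hidem]
          exact (if_congr (pv_container_cond _) rfl rfl).symm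
        rw [hEq]
        have hstr : PySem.Chars.strip (pvAstripContainer (PySem.Chars.strip v.toList))
            = pvAstripContainer (PySem.Chars.strip v.toList) :=
          pv_strip_container_stripped _ hidem
        rw [pv_split_chunks _ hstr, pv_modes0_final, pv_fold_final, ← pv_fold_filter,
          List.foldl_map, ← pv_slices_eq_chunks]
        simp only [pvPairsSlices, List.foldl_map]
        rfl
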